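-- pv_equiv track=rewrite | github.com/treeleaves30760/NNUE-mlx | src/search/evaluator.py | _chess_bad_bishop
-- ===== SOURCE A (Python) =====
-- from typing import List, Optional
--
-- def _chess_bad_bishop(white_bishop_squares: List[int],
--                        black_bishop_squares: List[int],
--                        white_pawn_squares: List[int],
--                        black_pawn_squares: List[int]) -> int:
--     """Bad-bishop penalty: a bishop is "bad" when many of its own pawns
--     are on squares of its colour, blocking its diagonals. Penalty is
--     proportional to the number of friendly pawns on matching-colour
--     squares — roughly -4 per pawn in MG, a touch less in the formula
--     below for simplicity (we apply flat -4).
--     """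
--     score = 0
--     for bsq in white_bishop_squares:
--         bishop_color = (bsq // 8 + bsq % 8) & 1
--         same_color = 0
--         for psq in white_pawn_squares:
--             if ((psq // 8 + psq % 8) & 1) == bishop_color:
--                 same_color += 1
--         score -= 4 * same_color
--     for bsq in black_bishop_squares:
--         bishop_color = (bsq // 8 + bsq % 8) & 1
--         same_color = 0
--         for psq in black_pawn_squares:
--             if ((psq // 8 + psq % 8) & 1) == bishop_color:
--                 same_color += 1
--         score += 4 * same_color
--     return score
-- ===== SOURCE B (Python) =====
-- from typing import List
--
-- def _chess_bad_bishop(white_bishop_squares: List[int],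
--                        black_bishop_squares: List[int],
--                        white_pawn_squares: List[int],
--                        black_pawn_squares: List[int]) -> int:
--     # One pass per list: tally how many squares are "dark" (colour bit 1),
--     # then combine the colour-category counts multiplicatively.
--     def dark(sq: int) -> int:
--         return (sq // 8 + sq % 8) & 1
--     w1 = sum(dark(sq) for sq in white_bishop_squares)
--     w0 = len(white_bishop_squares) - w1
--     b1 = sum(dark(sq) for sq in black_bishop_squares)
--     b0 = len(black_bishop_squares) - b1
--     p1 = sum(dark(sq) for sq in white_pawn_squares)
--     p0 = len(white_pawn_squares) - p1
--     q1 = sum(dark(sq) for sq in black_pawn_squares)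
--     q0 = len(black_pawn_squares) - q1
--     return 4 * (b0 * q0 + b1 * q1) - 4 * (w0 * p0 + w1 * p1)
-- ===== Notes on version B (the rewrite author's own statement) =====
-- stated objective: faster
-- what changed: Replaced the nested per-bishop scan over pawns by a single colour tally of each list (dark-square counts) combined in a closed-form product w0*p0+w1*p1 / b0*q0+b1*q1.
import Mathlib
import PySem

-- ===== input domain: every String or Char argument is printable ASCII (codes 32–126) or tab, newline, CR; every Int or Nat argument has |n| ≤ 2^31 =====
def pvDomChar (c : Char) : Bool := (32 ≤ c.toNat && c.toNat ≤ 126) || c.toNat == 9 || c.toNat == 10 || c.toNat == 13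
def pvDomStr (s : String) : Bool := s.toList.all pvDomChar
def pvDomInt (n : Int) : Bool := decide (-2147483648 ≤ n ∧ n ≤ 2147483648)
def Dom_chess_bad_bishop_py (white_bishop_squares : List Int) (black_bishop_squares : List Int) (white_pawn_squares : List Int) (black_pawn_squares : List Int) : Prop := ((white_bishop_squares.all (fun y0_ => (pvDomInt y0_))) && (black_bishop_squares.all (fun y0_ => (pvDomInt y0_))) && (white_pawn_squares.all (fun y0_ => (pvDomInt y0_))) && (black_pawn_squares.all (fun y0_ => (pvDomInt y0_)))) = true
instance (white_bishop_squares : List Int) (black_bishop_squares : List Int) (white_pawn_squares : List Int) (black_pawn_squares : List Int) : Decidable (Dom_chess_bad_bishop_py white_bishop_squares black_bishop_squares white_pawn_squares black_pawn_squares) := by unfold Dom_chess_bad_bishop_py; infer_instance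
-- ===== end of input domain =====

-- B replaces A's nested per-bishop pawn scan by one colour tally of each list combined in closed form (faster, asymptotic).

-- square colour bit (sq // 8 + sq % 8) & 1, the expression both Pythons compute
def pvColour (sq : Int) : Int :=
  PySem.Int.band (PySem.Int.floordiv sq 8 + PySem.Int.mod sq 8) 1

-- ===== PORT A =====
def chess_bad_bishop_py (white_bishop_squares : List Int) (black_bishop_squares : List Int) (white_pawn_squares : List Int) (black_pawn_squares : List Int) : Int :=
  let score : Int := 0
  let score := white_bishop_squares.foldl (fun score bsq =>
    let bishop_color := pvColour bsq
    let same_color := white_pawn_squares.foldl (fun same_color psq =>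
      if pvColour psq = bishop_color then same_color + 1 else same_color) (0 : Int)
    score - 4 * same_color) score
  let score := black_bishop_squares.foldl (fun score bsq =>
    let bishop_color := pvColour bsq
    let same_color := black_pawn_squares.foldl (fun same_color psq =>
      if pvColour psq = bishop_color then same_color + 1 else same_color) (0 : Int)
    score + 4 * same_color) score
  score

-- ===== PORT B =====
def chess_bad_bishop_py_alt (white_bishop_squares : List Int) (black_bishop_squares : List Int) (white_pawn_squares : List Int) (black_pawn_squares : List Int) : Int :=
  let w1 := (white_bishop_squares.map pvColour).sum
  let w0 := (white_bishop_squares.length : Int) - w1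
  let b1 := (black_bishop_squares.map pvColour).sum
  let b0 := (black_bishop_squares.length : Int) - b1
  let p1 := (white_pawn_squares.map pvColour).sum
  let p0 := (white_pawn_squares.length : Int) - p1
  let q1 := (black_pawn_squares.map pvColour).sum
  let q0 := (black_pawn_squares.length : Int) - q1
  4 * (b0 * q0 + b1 * q1) - 4 * (w0 * p0 + w1 * p1)

-- ===== PRECONDITION & SPEC =====
def Spec_chess_bad_bishop_py (white_bishop_squares : List Int) (black_bishop_squares : List Int) (white_pawn_squares : List Int) (black_pawn_squares : List Int) (out : Int) : Prop := out = chess_bad_bishop_py_alt white_bishop_squares black_bishop_squares white_pawn_squares black_pawn_squares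
instance (white_bishop_squares : List Int) (black_bishop_squares : List Int) (white_pawn_squares : List Int) (black_pawn_squares : List Int) (out : Int) : Decidable (Spec_chess_bad_bishop_py white_bishop_squares black_bishop_squares white_pawn_squares black_pawn_squares out) := by unfold Spec_chess_bad_bishop_py; infer_instance

-- ===== CLAIM (what is proved, stated in full; the proofs are below) =====
def Claim_equal_chess_bad_bishop_py : Prop := ∀ (white_bishop_squares : List Int) (black_bishop_squares : List Int) (white_pawn_squares : List Int) (black_pawn_squares : List Int), Dom_chess_bad_bishop_py white_bishop_squares black_bishop_squares white_pawn_squares black_pawn_squares → Spec_chess_bad_bishop_py white_bishop_squares black_bishop_squares white_pawn_squares black_pawn_squares (chess_bad_bishop_py white_bishop_squares black_bishop_squares white_pawn_squares black_pawn_squares)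

-- ===== LEMMAS AND PROOFS =====

theorem pvColour_cases (sq : Int) : pvColour sq = 0 ∨ pvColour sq = 1 := by
  unfold pvColour
  rw [PySem.Int.band_one]
  have h1 := PySem.Int.mod_nonneg (PySem.Int.floordiv sq 8 + PySem.Int.mod sq 8) (b := 2) (by norm_num)
  have h2 := PySem.Int.mod_lt (PySem.Int.floordiv sq 8 + PySem.Int.mod sq 8) (b := 2) (by norm_num)
  omega

-- the inner pawn loop counts pawns of colour c (c ∈ {0,1})
theorem pvInner (c : Int) (hc : c = 0 ∨ c = 1) (xs : List Int) (init : Int) :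
    xs.foldl (fun s p => if pvColour p = c then s + 1 else s) init
      = init + (if c = 1 then (xs.map pvColour).sum
                else (xs.length : Int) - (xs.map pvColour).sum) := by
  induction xs generalizing init with
  | nil => rcases hc with h | h <;> simp [h]
  | cons p xs ih =>
    simp only [List.foldl_cons, List.map_cons, List.sum_cons, List.length_cons]
    rw [ih]
    rcases pvColour_cases p with hp | hp <;> rcases hc with h | h <;>
      simp [hp, h] <;> ring

-- the outer bishop loop, for either sign k, equals the colour-count combination
theorem pvOuter (k : Int) (ps : List Int) (bs : List Int) (init : Int) :
    bs.foldl (fun score bsq =>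
      score + k * (ps.foldl (fun s p => if pvColour p = pvColour bsq then s + 1 else s) (0 : Int))) init
      = init + k * (((bs.length : Int) - (bs.map pvColour).sum) * ((ps.length : Int) - (ps.map pvColour).sum)
                    + (bs.map pvColour).sum * (ps.map pvColour).sum) := by
  induction bs generalizing init with
  | nil => simp
  | cons b bs ih =>
    simp only [List.foldl_cons, List.map_cons, List.sum_cons, List.length_cons]
    rw [ih, pvInner (pvColour b) (pvColour_cases b)]
    rcases pvColour_cases b with hb | hb <;> simp [hb] <;> ring

-- ===== VERDICT (by name: the statement is the Claim_ definition above) =====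
theorem chess_bad_bishop_py_spec : Claim_equal_chess_bad_bishop_py := by
  intro wb bb wp bp _
  unfold Spec_chess_bad_bishop_py chess_bad_bishop_py chess_bad_bishop_py_alt
  simp only []
  have hw := pvOuter (-4) wp wb 0
  have hb' := pvOuter 4 bp bb
      (wb.foldl (fun score bsq =>
        score + (-4) * (wp.foldl (fun s p => if pvColour p = pvColour bsq then s + 1 else s) (0 : Int))) 0)
  have ew : (fun (score bsq : Int) =>
      score - 4 * (wp.foldl (fun s p => if pvColour p = pvColour bsq then s + 1 else s) (0 : Int)))
      = (fun score bsq =>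
      score + (-4) * (wp.foldl (fun s p => if pvColour p = pvColour bsq then s + 1 else s) (0 : Int))) := by
    funext s b; ring
  rw [ew, hb', hw]
  ring
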